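-- pv_equiv track=rewrite | github.com/csharpee/Map-Projections | src/zupplemental/helpers.py | line_break
-- ===== SOURCE A (Python) =====
-- def line_break(line):
-- 	"""replace some space with a newline; whichever space is closest to the center"""
-- 	total_length = len(line)
-- 	words = line.split(' ')
-- 	best_length = float('inf')
-- 	left_length = 0
-- 	for i in range(len(words)-1):
-- 		left_length += len(words[i])+1
-- 		if max(left_length, total_length-left_length) < best_length:
-- 			best_length = max(left_length, total_length-left_length)
-- 			best_idx = left_length
-- 	return line[:best_idx-1] + '\n' + line[best_idx:]
-- ===== SOURCE B (Python) =====
-- def line_break(line):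
-- 	"""replace some space with a newline; whichever space is closest to the center"""
-- 	n = len(line)
-- 	i = (n - 2) // 2
-- 	j = n - 2 - i
-- 	while i >= 0 or j <= n - 1:
-- 		if 0 <= i < n and line[i] == ' ':
-- 			return line[:i] + '\n' + line[i + 1:]
-- 		if 0 <= j < n and line[j] == ' ':
-- 			return line[:j] + '\n' + line[j + 1:]
-- 		i -= 1
-- 		j += 1
-- 	raise ValueError('line contains no space')
-- ===== Notes on version B (the rewrite author's own statement) =====
-- stated objective: alternative
-- what changed: Instead of splitting into words and scoring every candidate split with a running best, B searches outward from the center with two pointers (left pointer checked first, matching A's leftmost tie-break) and returns at the first space found, never computing any score.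
import Mathlib
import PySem

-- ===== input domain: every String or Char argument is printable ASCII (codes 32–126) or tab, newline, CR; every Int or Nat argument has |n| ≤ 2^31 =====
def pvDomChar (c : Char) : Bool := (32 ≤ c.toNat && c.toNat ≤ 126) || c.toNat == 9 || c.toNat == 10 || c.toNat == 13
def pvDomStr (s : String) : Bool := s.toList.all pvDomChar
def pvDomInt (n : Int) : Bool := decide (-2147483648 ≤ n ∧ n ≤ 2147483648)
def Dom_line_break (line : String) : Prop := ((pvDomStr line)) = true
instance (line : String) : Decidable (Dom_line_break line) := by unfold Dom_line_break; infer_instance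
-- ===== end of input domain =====

-- B drops A's word-split + score-every-candidate loop entirely: it runs two pointers outward
-- from the center (left pointer checked first = A's leftmost tie-break) and returns at the
-- first space found, computing no score; same asymptotic cost, different algorithm.

-- ===== PORT A =====
-- the loop body of A (`left_length += len(words[i])+1; if max(...) < best_length: ...`) as a helper;
-- `best_length = float('inf')` is modeled as `none` (it is only ever compared), `best_idx` starts as
-- `none` = unassigned; state = (best_length, left_length, best_idx)
def pvStepA (n : Int) (st : Option Int × Int × Option Int) (w : List Char) :
    Option Int × Int × Option Int :=
  let leftLen := st.2.1 + PySem.Chars.len w + 1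
  let m := max leftLen (n - leftLen)
  if (match st.1 with | none => true | some b => decide (m < b)) then
    (some m, leftLen, some leftLen)
  else (st.1, leftLen, st.2.2)

def line_break (line : String) : String :=
  let totalLength : Int := PySem.Chars.len line.toList
  let words : List (List Char) := PySem.Chars.splitOn line.toList [' ']
  let st : Option Int × Int × Option Int :=
    (PySem.List.pyRange 0 ((words.length : Int) - 1)).foldl
      (fun st i => pvStepA totalLength st (PySem.List.pyGetD words i []))
      (none, 0, none)
  match st.2.2 with
  | some bestIdx =>
      String.ofList (PySem.List.slice line.toList none (some (bestIdx - 1)) ++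
        '\n' :: PySem.List.slice line.toList (some bestIdx) none)
  | none => ""  -- Python raises UnboundLocalError here (no space in line); excluded by Pre_

-- ===== PORT B =====
-- the while loop of Source B: state (i, j); `line[i] == ' '` is the bounds-guarded index
-- (pyGetD is only reached when 0 ≤ i < n, exactly as Python short-circuits the `and`)
def pvScan (cs : List Char) (n : Int) : Nat → Int → Int → Option Int
  | 0, _, _ => none  -- fuel guard only: it expires exactly when the loop condition is already false
  | fuel + 1, i, j =>
    if 0 ≤ i ∨ j ≤ n - 1 then
      if 0 ≤ i ∧ i < n ∧ PySem.List.pyGetD cs i '?' = ' ' then some i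
      else if 0 ≤ j ∧ j < n ∧ PySem.List.pyGetD cs j '?' = ' ' then some j
      else pvScan cs n fuel (i - 1) (j + 1)
    else none

def line_break_alt (line : String) : String :=
  let n : Int := PySem.Chars.len line.toList
  let i0 : Int := PySem.Int.floordiv (n - 2) 2
  let j0 : Int := n - 2 - i0
  match pvScan line.toList n (i0 + 2).toNat i0 j0 with
  | some p =>
      String.ofList (PySem.List.slice line.toList none (some p) ++
        '\n' :: PySem.List.slice line.toList (some (p + 1)) none)
  | none => ""  -- Python raises ValueError here (no space in line); excluded by Pre_

-- ===== PRECONDITION & SPEC =====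
-- Pre_ excludes lines containing no space: there Python A raises UnboundLocalError (and B raises ValueError).
def Pre_line_break (line : String) : Prop := ' ' ∈ line.toList
instance (line : String) : Decidable (Pre_line_break line) := by unfold Pre_line_break; infer_instance
def pvWitness_line_break : String := "a b"
def Spec_line_break (line : String) (out : String) : Prop := out = line_break_alt line
instance (line : String) (out : String) : Decidable (Spec_line_break line out) := by unfold Spec_line_break; infer_instance

-- ===== CLAIM (what is proved, stated in full; the proofs are below) =====
def Claim_equal_line_break : Prop := ∀ (line : String), Dom_line_break line → Pre_line_break line → Spec_line_break line (line_break line)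

-- ===== LEMMAS AND PROOFS =====

-- ---- A-side: reduce A's word fold to an argmin fold over the space positions ----

def pvSegs : List Char → List (List Char)
  | [] => [[]]
  | c :: rest => if c = ' ' then [] :: pvSegs rest else (pvSegs rest).modifyHead (c :: ·)

theorem pvSegs_ne_nil (cs : List Char) : pvSegs cs ≠ [] := by
  cases cs with
  | nil => simp [pvSegs]
  | cons c rest =>
    simp only [pvSegs]
    split_ifs
    · simp
    · cases h : pvSegs rest with
      | nil => exact absurd h (pvSegs_ne_nil rest)
      | cons w t => simp [List.modifyHead]

theorem pvGo_spec (fuel : Nat) : ∀ (l cur : List Char) (accs : List (List Char)),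
    l.length < fuel →
    PySem.Chars.splitOn.go [' '] fuel l cur accs =
      accs.reverse ++ (pvSegs l).modifyHead (cur.reverse ++ ·) := by
  induction fuel with
  | zero => intro l cur accs h; omega
  | succ n ih =>
    intro l cur accs h
    cases l with
    | nil =>
      simp [PySem.Chars.splitOn.go, pvSegs, List.modifyHead]
    | cons c rest =>
      by_cases hc : c = ' '
      · subst hc
        rw [show PySem.Chars.splitOn.go [' '] (n+1) (' ' :: rest) cur accs
              = PySem.Chars.splitOn.go [' '] n rest [] (cur.reverse :: accs) from by
            simp [PySem.Chars.splitOn.go, List.isPrefixOf]]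
        rw [ih rest [] (cur.reverse :: accs) (by simpa using Nat.lt_of_succ_lt_succ h)]
        cases hseg : pvSegs rest with
        | nil => exact absurd hseg (pvSegs_ne_nil rest)
        | cons w t => simp [pvSegs, hseg, List.modifyHead]
      · rw [show PySem.Chars.splitOn.go [' '] (n+1) (c :: rest) cur accs
              = PySem.Chars.splitOn.go [' '] n rest (c :: cur) accs from by
            have hb : (' ' == c) = false := by simpa using fun h' => hc h'.symm
            simp [PySem.Chars.splitOn.go, List.isPrefixOf, hb]]
        rw [ih rest (c :: cur) accs (by simpa using Nat.lt_of_succ_lt_succ h)]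
        cases hseg : pvSegs rest with
        | nil => exact absurd hseg (pvSegs_ne_nil rest)
        | cons w t => simp [pvSegs, hseg, hc, List.modifyHead]

theorem pvSplitOn_eq_segs (cs : List Char) : PySem.Chars.splitOn cs [' '] = pvSegs cs := by
  have := pvGo_spec (cs.length + 1) cs [] [] (by omega)
  simp only [PySem.Chars.splitOn]
  rw [this]
  cases h : pvSegs cs with
  | nil => exact absurd h (pvSegs_ne_nil cs)
  | cons w t => simp [List.modifyHead]

def pvCumsum : Int → List (List Char) → List Int
  | _, [] => []
  | l0, w :: ws => (l0 + PySem.Chars.len w + 1) :: pvCumsum (l0 + PySem.Chars.len w + 1) ws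

theorem pvCumsum_spec (cs : List Char) : ∀ (l0 : Int),
    pvCumsum l0 ((pvSegs cs).dropLast) =
      (((PySem.List.enumerate cs l0).filter (fun p => p.2 == ' ')).map (fun p => p.1)).map
        (fun p => p + 1) := by
  induction cs with
  | nil => intro l0; simp [pvSegs, pvCumsum, PySem.List.enumerate]
  | cons c rest ih =>
    intro l0
    by_cases hc : c = ' '
    · subst hc
      cases hseg : pvSegs rest with
      | nil => exact absurd hseg (pvSegs_ne_nil rest)
      | cons w t =>
        have := ih (l0 + 1)
        rw [hseg] at this
        simp only [pvSegs, if_pos rfl, hseg, PySem.List.enumerate_cons, List.filter_cons,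
          List.dropLast_cons₂, pvCumsum, PySem.Chars.len]
        simp only [if_true, beq_self_eq_true, List.dropLast_cons₂, pvCumsum, List.map_cons,
          PySem.Chars.len, List.length_nil]
        rw [show l0 + ((0:Nat):Int) + 1 = l0 + 1 by norm_num]
        rw [this]
    · cases hseg : pvSegs rest with
      | nil => exact absurd hseg (pvSegs_ne_nil rest)
      | cons w t =>
        have := ih (l0 + 1)
        rw [hseg] at this
        have hb : (c == ' ') = false := by simpa using hc
        cases t with
        | nil =>
          simp only [pvSegs, if_neg hc, hseg, List.modifyHead, PySem.List.enumerate_cons,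
            List.filter_cons, hb, List.dropLast_singleton, pvCumsum] at *
          simpa using this
        | cons t1 t2 =>
          simp only [pvSegs, if_neg hc, hseg, List.modifyHead, List.dropLast_cons₂,
            pvCumsum, PySem.Chars.len, PySem.List.enumerate_cons, List.filter_cons, hb] at *
          simp only [if_neg (by simp : ¬(false = true))]
          rw [show l0 + ((c :: w).length : Int) + 1 = l0 + 1 + (w.length : Int) + 1 by simp [List.length_cons]; push_cast; ring]
          exact this

theorem pvFoldA_proj (n : Int) (ws : List (List Char)) : ∀ (b : Option Int) (l0 : Int) (i : Option Int),
    (ws.foldl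
      (fun (st : Option Int × Int × Option Int) w =>
        let leftLen := st.2.1 + PySem.Chars.len w + 1
        let m := max leftLen (n - leftLen)
        if (match st.1 with | none => true | some b => decide (m < b)) then
          (some m, leftLen, some leftLen)
        else (st.1, leftLen, st.2.2))
      (b, l0, i) |> fun r => (r.1, r.2.2)) =
    (pvCumsum l0 ws).foldl
      (fun (st : Option Int × Option Int) y =>
        let m := max y (n - y)
        if (match st.1 with | none => true | some b => decide (m < b)) then (some m, some y)
        else st)
      (b, i) := by
  induction ws with
  | nil => intro b l0 i; simp [pvCumsum]
  | cons w ws ih =>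
    intro b l0 i
    simp only [List.foldl_cons, pvCumsum]
    cases b with
    | none =>
      simp only [if_true]
      exact ih (some (max (l0 + PySem.Chars.len w + 1) (n - (l0 + PySem.Chars.len w + 1))))
        (l0 + PySem.Chars.len w + 1) (some (l0 + PySem.Chars.len w + 1))
    | some bv =>
      by_cases hlt : max (l0 + PySem.Chars.len w + 1) (n - (l0 + PySem.Chars.len w + 1)) < bv
      · have hd := decide_eq_true hlt
        simp only [hd, if_true]
        exact ih (some (max (l0 + PySem.Chars.len w + 1) (n - (l0 + PySem.Chars.len w + 1))))
          (l0 + PySem.Chars.len w + 1) (some (l0 + PySem.Chars.len w + 1))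
      · have hd := decide_eq_false hlt
        simp only [hd, Bool.false_eq_true, if_false]
        exact ih (some bv) (l0 + PySem.Chars.len w + 1) i

theorem pvFoldA_proj' (n : Int) (ws : List (List Char)) (b : Option Int) (l0 : Int) (i : Option Int) :
    (ws.foldl (fun st w => pvStepA n st w) (b, l0, i) |> fun r => (r.1, r.2.2)) =
    (pvCumsum l0 ws).foldl
      (fun (st : Option Int × Option Int) y =>
        let m := max y (n - y)
        if (match st.1 with | none => true | some b => decide (m < b)) then (some m, some y)
        else st)
      (b, i) := by
  simp only [pvStepA]
  exact pvFoldA_proj n ws b l0 i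

theorem pvSel_eq_fold (n : Int) (ys : List Int) : ∀ (acc : Option Int),
    (ys.foldl
      (fun (st : Option Int × Option Int) y =>
        let m := max y (n - y)
        if (match st.1 with | none => true | some b => decide (m < b)) then (some m, some y)
        else st)
      (acc.map (fun y => max y (n - y)), acc)).2 =
    ys.foldl
      (fun (a : Option Int) (x : Int) =>
        match a with
        | none => some x
        | some m => if max x (n - x) < max m (n - m) then some x else some m)
      acc := by
  induction ys with
  | nil => intro acc; simp
  | cons y ys ih =>
    intro acc
    simp only [List.foldl_cons]
    cases acc with
    | none =>
      simp only [Option.map_none, if_true]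
      have h2 := ih (some y); simp only [Option.map_some] at h2; exact h2
    | some m =>
      simp only [Option.map_some]
      by_cases hlt : max y (n - y) < max m (n - m)
      · have hd := decide_eq_true hlt
        simp only [hd, if_true]
        rw [if_pos hlt]
        have h2 := ih (some y); simp only [Option.map_some] at h2; exact h2
      · have hd := decide_eq_false hlt
        simp only [hd, Bool.false_eq_true, if_false]
        rw [if_neg hlt]
        have h2 := ih (some m); simp only [Option.map_some] at h2; exact h2

theorem pvFold_min_map (f : Int → Int) (key : Int → Int) (xs : List Int) : ∀ (acc : Option Int),
    (xs.map f).foldl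
      (fun (a : Option Int) x => match a with
        | none => some x
        | some m => if key x < key m then some x else some m)
      (acc.map f) =
    (xs.foldl
      (fun (a : Option Int) x => match a with
        | none => some x
        | some m => if key (f x) < key (f m) then some x else some m)
      acc).map f := by
  induction xs with
  | nil => intro acc; simp
  | cons x xs ih =>
    intro acc
    simp only [List.map_cons, List.foldl_cons]
    cases acc with
    | none =>
      have h2 := ih (some x); simp only [Option.map_some] at h2; exact h2
    | some m =>
      simp only [Option.map_some]
      by_cases hlt : key (f x) < key (f m)
      · rw [if_pos hlt, if_pos hlt]
        have h2 := ih (some x); simp only [Option.map_some] at h2; exact h2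
      · rw [if_neg hlt, if_neg hlt]
        have h2 := ih (some m); simp only [Option.map_some] at h2; exact h2

-- ---- the common argmin fold: first element minimizing pvKey, over the space positions ----

def pvKey (n x : Int) : Int := max (x + 1) (n - (x + 1))

def pvPick (n : Int) (a : Option Int) (x : Int) : Option Int :=
  match a with
  | none => some x
  | some m => if pvKey n x < pvKey n m then some x else some m

def pvSpaces (cs : List Char) : List Int :=
  ((PySem.List.enumerate cs).filter (fun p => p.2 == ' ')).map (fun p => p.1)

theorem pvPick_acc (n : Int) (xs : List Int) : ∀ (a p : Int),
    xs.Pairwise (· < ·) →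
    (∀ q ∈ xs, a < q) →
    (p = a ∨ p ∈ xs) →
    (∀ q, (q = a ∨ q ∈ xs) → pvKey n p < pvKey n q ∨ (pvKey n p = pvKey n q ∧ p ≤ q)) →
    xs.foldl (pvPick n) (some a) = some p := by
  induction xs with
  | nil =>
    intro a p _ _ hp _
    rcases hp with rfl | h
    · rfl
    · simp at h
  | cons x rest ih =>
    intro a p hsort hlt hp hmin
    have hax : a < x := hlt x (by simp)
    obtain ⟨hxrest, hsort'⟩ := List.pairwise_cons.mp hsort
    simp only [List.foldl_cons]
    by_cases hbr : pvKey n x < pvKey n a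
    · rw [show pvPick n (some a) x = some x from by simp [pvPick, hbr]]
      have hpa : p ≠ a := by
        rintro rfl
        rcases hmin x (Or.inr (by simp)) with h | ⟨h, _⟩
        · exact absurd hbr (lt_asymm h)
        · omega
      apply ih x p hsort' hxrest
      · rcases hp with rfl | hmem
        · exact absurd rfl hpa
        · rcases List.mem_cons.mp hmem with rfl | h
          · exact Or.inl rfl
          · exact Or.inr h
      · intro q hq
        apply hmin q
        rcases hq with rfl | h
        · exact Or.inr (by simp)
        · exact Or.inr (by simp [h])
    · rw [show pvPick n (some a) x = some a from by simp [pvPick, hbr]]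
      have hpx : p ≠ x := by
        rintro rfl
        rcases hmin a (Or.inl rfl) with h | ⟨_, h⟩
        · exact hbr h
        · omega
      apply ih a p hsort' (fun q hq => lt_trans hax (hxrest q hq))
      · rcases hp with rfl | hmem
        · exact Or.inl rfl
        · rcases List.mem_cons.mp hmem with rfl | h
          · exact absurd rfl hpx
          · exact Or.inr h
      · intro q hq
        apply hmin q
        rcases hq with rfl | h
        · exact Or.inl rfl
        · exact Or.inr (by simp [h])

theorem pvPick_argmin (n : Int) (xs : List Int) (p : Int)
    (hsort : xs.Pairwise (· < ·)) (hp : p ∈ xs)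
    (hmin : ∀ q ∈ xs, pvKey n p < pvKey n q ∨ (pvKey n p = pvKey n q ∧ p ≤ q)) :
    xs.foldl (pvPick n) none = some p := by
  cases xs with
  | nil => simp at hp
  | cons x rest =>
    obtain ⟨hxrest, hsort'⟩ := List.pairwise_cons.mp hsort
    simp only [List.foldl_cons]
    rw [show pvPick n none x = some x from rfl]
    apply pvPick_acc n rest x p hsort' hxrest
    · rcases List.mem_cons.mp hp with rfl | h
      · exact Or.inl rfl
      · exact Or.inr h
    · intro q hq
      apply hmin q
      rcases hq with rfl | h
      · exact by simp
      · exact by simp [h]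

-- ---- the space positions: membership, lower bound, sortedness ----

theorem pvSpacesAux_mem (cs : List Char) : ∀ (s x : Int),
    (x ∈ ((PySem.List.enumerate cs s).filter (fun p => p.2 == ' ')).map (fun p => p.1)) ↔
    ∃ k : Nat, ∃ hk : k < cs.length, x = s + k ∧ cs[k] = ' ' := by
  induction cs with
  | nil => intro s x; simp [PySem.List.enumerate_nil]
  | cons c rest ih =>
    intro s x
    rw [PySem.List.enumerate_cons]
    by_cases hc : c = ' '
    · rw [List.filter_cons_of_pos (by simpa using hc)]
      rw [List.map_cons, List.mem_cons]
      simp only [ih]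
      constructor
      · rintro (hx | ⟨k, hk, hx, hsp⟩)
        · exact ⟨0, by simp, by simpa using hx, by simpa using hc⟩
        · exact ⟨k + 1, by simpa using Nat.succ_lt_succ hk,
            by rw [hx]; push_cast; ring, by simpa using hsp⟩
      · rintro ⟨k, hk, hx, hsp⟩
        cases k with
        | zero => left; simpa using hx
        | succ m =>
          right
          exact ⟨m, by simpa using hk, by rw [hx]; push_cast; ring, by simpa using hsp⟩
    · rw [List.filter_cons_of_neg (by simpa using hc)]
      rw [ih]
      constructor
      · rintro ⟨k, hk, hx, hsp⟩
        exact ⟨k + 1, by simpa using Nat.succ_lt_succ hk,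
          by rw [hx]; push_cast; ring, by simpa using hsp⟩
      · rintro ⟨k, hk, hx, hsp⟩
        cases k with
        | zero => exact absurd (by simpa using hsp) hc
        | succ m => exact ⟨m, by simpa using hk, by rw [hx]; push_cast; ring, by simpa using hsp⟩

theorem pvSpaces_mem (cs : List Char) (x : Int) :
    x ∈ pvSpaces cs ↔ 0 ≤ x ∧ x < (cs.length : Int) ∧ PySem.List.pyGetD cs x '?' = ' ' := by
  rw [pvSpaces, pvSpacesAux_mem cs 0 x]
  constructor
  · rintro ⟨k, hk, hx, hsp⟩
    have hx' : x = (k : Int) := by simpa using hx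
    refine ⟨by omega, by simp [hx']; exact_mod_cast hk, ?_⟩
    rw [PySem.List.pyGetD_eq_getElem _ _ (by omega) (by simp [hx']; exact_mod_cast hk)]
    simp [hx']
    exact hsp
  · rintro ⟨h0, hn, hsp⟩
    refine ⟨x.toNat, by omega, by omega, ?_⟩
    rw [PySem.List.pyGetD_eq_getElem _ _ h0 hn] at hsp
    exact hsp

theorem pvSpacesAux_lb (cs : List Char) (s x : Int)
    (h : x ∈ ((PySem.List.enumerate cs s).filter (fun p => p.2 == ' ')).map (fun p => p.1)) :
    s ≤ x := by
  obtain ⟨k, hk, hx, _⟩ := (pvSpacesAux_mem cs s x).mp h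
  omega

theorem pvSpacesAux_sorted (cs : List Char) : ∀ (s : Int),
    (((PySem.List.enumerate cs s).filter (fun p => p.2 == ' ')).map (fun p => p.1)).Pairwise (· < ·) := by
  induction cs with
  | nil => intro s; simp [PySem.List.enumerate_nil]
  | cons c rest ih =>
    intro s
    rw [PySem.List.enumerate_cons]
    by_cases hc : c = ' '
    · rw [List.filter_cons_of_pos (by simpa using hc), List.map_cons]
      refine List.pairwise_cons.mpr ⟨?_, ih (s + 1)⟩
      intro y hy
      have hlb := pvSpacesAux_lb rest (s + 1) y hy
      show s < y
      omega
    · rw [List.filter_cons_of_neg (by simpa using hc)]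
      exact ih (s + 1)

theorem pvSpaces_sorted (cs : List Char) : (pvSpaces cs).Pairwise (· < ·) :=
  pvSpacesAux_sorted cs 0

-- ---- the center-out scan computes the argmin fold ----

theorem pvScan_fold (cs : List Char) (n : Int) (hn : n = (cs.length : Int)) :
    ∀ (fuel : Nat) (i j : Int), (i + 2).toNat ≤ fuel → i + j = n - 2 → 2 * i ≤ n - 2 →
    pvScan cs n fuel i j =
      ((pvSpaces cs).filter (fun x => decide (x ≤ i ∨ j ≤ x))).foldl (pvPick n) none := by
  subst hn
  intro fuel
  induction fuel with
  | zero =>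
    intro i j hfuel hij h2
    have hnil : ((pvSpaces cs).filter (fun x => decide (x ≤ i ∨ j ≤ x))) = [] := by
      apply List.filter_eq_nil_iff.mpr
      intro x hx
      obtain ⟨h0, hlen, _⟩ := (pvSpaces_mem cs x).mp hx
      simp only [decide_eq_true_eq]
      omega
    rw [hnil]
    rfl
  | succ f ih =>
    intro i j hfuel hij h2
    show (if 0 ≤ i ∨ j ≤ (cs.length : Int) - 1 then _ else none) = _
    by_cases hcond : 0 ≤ i ∨ j ≤ (cs.length : Int) - 1
    · rw [if_pos hcond]
      by_cases hi : 0 ≤ i ∧ i < (cs.length : Int) ∧ PySem.List.pyGetD cs i '?' = ' '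
      · rw [if_pos hi]
        symm
        apply pvPick_argmin
        · exact (pvSpaces_sorted cs).filter _
        · exact List.mem_filter.mpr ⟨(pvSpaces_mem cs i).mpr ⟨hi.1, hi.2.1, hi.2.2⟩, by simp⟩
        · intro q hq
          obtain ⟨hqs, hqr⟩ := List.mem_filter.mp hq
          obtain ⟨hq0, hqn, _⟩ := (pvSpaces_mem cs q).mp hqs
          have hqr' : q ≤ i ∨ j ≤ q := by simpa using hqr
          simp only [pvKey]
          omega
      · rw [if_neg hi]
        by_cases hj : 0 ≤ j ∧ j < (cs.length : Int) ∧ PySem.List.pyGetD cs j '?' = ' '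
        · rw [if_pos hj]
          symm
          apply pvPick_argmin
          · exact (pvSpaces_sorted cs).filter _
          · exact List.mem_filter.mpr ⟨(pvSpaces_mem cs j).mpr ⟨hj.1, hj.2.1, hj.2.2⟩, by simp⟩
          · intro q hq
            obtain ⟨hqs, hqr⟩ := List.mem_filter.mp hq
            obtain ⟨hq0, hqn, hqsp⟩ := (pvSpaces_mem cs q).mp hqs
            have hqr' : q ≤ i ∨ j ≤ q := by simpa using hqr
            have hqi : q ≠ i := by
              rintro rfl
              exact hi ⟨hq0, hqn, hqsp⟩
            simp only [pvKey]
            omega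
        · rw [if_neg hj]
          rw [ih (i - 1) (j + 1) (by omega) (by omega) (by omega)]
          congr 1
          apply List.filter_congr
          intro x hx
          obtain ⟨hx0, hxn, hxsp⟩ := (pvSpaces_mem cs x).mp hx
          have hxi : x ≠ i := by rintro rfl; exact hi ⟨hx0, hxn, hxsp⟩
          have hxj : x ≠ j := by rintro rfl; exact hj ⟨hx0, hxn, hxsp⟩
          simp only [decide_eq_decide]
          omega
    · rw [if_neg hcond]
      have hnil : ((pvSpaces cs).filter (fun x => decide (x ≤ i ∨ j ≤ x))) = [] := by
        apply List.filter_eq_nil_iff.mpr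
        intro x hx
        obtain ⟨h0, hlen, _⟩ := (pvSpaces_mem cs x).mp hx
        simp only [decide_eq_true_eq]
        omega
      rw [hnil]
      rfl

theorem pvScan_full (cs : List Char) (n : Int) (hn : n = (cs.length : Int)) :
    pvScan cs n (PySem.Int.floordiv (n - 2) 2 + 2).toNat (PySem.Int.floordiv (n - 2) 2)
        (n - 2 - PySem.Int.floordiv (n - 2) 2) =
      (pvSpaces cs).foldl (pvPick n) none := by
  subst hn
  have hfd : (PySem.Int.floordiv ((cs.length : Int) - 2) 2) * 2 ≤ (cs.length : Int) - 2 ∧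
      (cs.length : Int) - 2 < (PySem.Int.floordiv ((cs.length : Int) - 2) 2 + 1) * 2 :=
    (PySem.Int.floordiv_eq_iff_of_pos (by norm_num)).mp rfl
  rw [pvScan_fold cs _ rfl ((PySem.Int.floordiv ((cs.length : Int) - 2) 2 + 2).toNat) _ _ (le_refl _) (by ring) (by omega)]
  congr 1
  apply List.filter_eq_self.mpr
  intro x hx
  obtain ⟨h0, hlen, _⟩ := (pvSpaces_mem cs x).mp hx
  simp only [decide_eq_true_eq]
  omega

-- ---- main equivalence ----

theorem pv_main (line : String) : line_break line = line_break_alt line := by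
  simp only [line_break, line_break_alt]
  rw [pvSplitOn_eq_segs]
  have hne := pvSegs_ne_nil line.toList
  have hlen1 : 1 ≤ (pvSegs line.toList).length := List.length_pos_of_ne_nil hne
  have hrange : ((pvSegs line.toList).length : Int) - 1
      = (((pvSegs line.toList).dropLast.length : Nat) : Int) := by
    rw [List.length_dropLast]; omega
  rw [hrange]
  have hswap : ∀ (acc : Option Int × Int × Option Int),
      ∀ i ∈ PySem.List.pyRange 0 (((pvSegs line.toList).dropLast.length : Nat) : Int),
      (fun (st : Option Int × Int × Option Int) i =>
        pvStepA (PySem.Chars.len line.toList) st (PySem.List.pyGetD (pvSegs line.toList) i [])) acc i =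
      (fun (st : Option Int × Int × Option Int) i =>
        pvStepA (PySem.Chars.len line.toList) st
          (PySem.List.pyGetD ((pvSegs line.toList).dropLast) i [])) acc i := by
    intro acc i hi
    dsimp only
    rw [PySem.List.mem_pyRange_one] at hi
    have h0 : 0 ≤ i := hi.1
    have h1 : i < ((pvSegs line.toList).dropLast.length : Int) := by exact_mod_cast hi.2
    have h2 : i < ((pvSegs line.toList).length : Int) := by
      rw [List.length_dropLast] at h1; omega
    rw [PySem.List.pyGetD_eq_getElem _ _ h0 h2,
        PySem.List.pyGetD_eq_getElem _ _ h0 h1,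
        List.getElem_dropLast]
  rw [PySem.List.foldl_congr_mem _ _ _ _ hswap]
  rw [PySem.List.foldl_pyRange_pyGetD' ((pvSegs line.toList).dropLast) []
    (fun st w => pvStepA (PySem.Chars.len line.toList) st w) (none, 0, none) (le_refl 0)]
  simp only [Int.toNat_zero, List.drop_zero]
  have hproj := congrArg Prod.snd
    (pvFoldA_proj' (PySem.Chars.len line.toList) ((pvSegs line.toList).dropLast) none 0 none)
  simp only [] at hproj
  rw [hproj]
  rw [pvCumsum_spec line.toList 0]
  have hsel := pvSel_eq_fold (PySem.Chars.len line.toList)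
    ((((PySem.List.enumerate line.toList 0).filter (fun p => p.2 == ' ')).map (fun p => p.1)).map
      (fun p => p + 1)) none
  simp only [Option.map_none] at hsel
  rw [hsel]
  have hmap := pvFold_min_map (fun x => x + 1)
    (fun y => max y (PySem.Chars.len line.toList - y))
    (((PySem.List.enumerate line.toList 0).filter (fun p => p.2 == ' ')).map (fun p => p.1)) none
  simp only [Option.map_none] at hmap
  rw [hmap]
  rw [pvScan_full line.toList (PySem.Chars.len line.toList) (by simp [PySem.Chars.len])]
  rw [show (fun (a : Option Int) (x : Int) =>
        match a with
        | none => some x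
        | some m =>
          if max (x + 1) (PySem.Chars.len line.toList - (x + 1))
              < max (m + 1) (PySem.Chars.len line.toList - (m + 1)) then some x else some m) =
      pvPick (PySem.Chars.len line.toList) from by
    funext a x
    cases a <;> rfl]
  rw [show (((PySem.List.enumerate line.toList 0).filter (fun p => p.2 == ' ')).map (fun p => p.1)) =
      pvSpaces line.toList from rfl]
  cases hM : (pvSpaces line.toList).foldl (pvPick (PySem.Chars.len line.toList)) none with
  | none => simp
  | some p =>
    simp only [Option.map_some]
    rw [add_sub_cancel_right]

-- ===== VERDICT (by name: the statement is the Claim_ definition above) =====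
theorem line_break_spec : Claim_equal_line_break := fun line _ _ => pv_main line
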